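-- pv_equiv track=rewrite | github.com/KakaHiguain/FML | player_name_utils.py | get_first_name_dict
-- ===== SOURCE A (Python) =====
-- from collections import defaultdict
-- from typing import Dict, List
--
-- def get_first_name_dict(player_names: List[str]) -> Dict[str, List[str]]:
--     """ Return last name -> list of first names """
--     last_name_set = set()
--     first_name_count = defaultdict(int)
--     first_name_dict = defaultdict(list)
--     for name in player_names:
--         name_parts = name.split(' ')
--         last_name = name_parts[-1]
--         first_name = name_parts[-2] if len(name_parts) > 1 else ''
--         last_name_set.add(last_name)
--         first_name_count[first_name] += 1
--         first_name_dict[last_name].append(first_name)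
--     return first_name_dict
-- ===== SOURCE B (Python) =====
-- from collections import defaultdict
-- from typing import Dict, List
--
--
-- def get_first_name_dict(player_names: List[str]) -> Dict[str, List[str]]:
--     """ Return last name -> list of first names (group by key, two phases) """
--     def parse(name):
--         parts = name.split(' ')
--         return parts[-1], parts[-2] if len(parts) > 1 else ''
--
--     pairs = [parse(name) for name in player_names]
--     result = defaultdict(list)
--     for last in dict.fromkeys(last for last, _ in pairs):
--         result[last] = [first for l, first in pairs if l == last]
--     return result
-- ===== Notes on version B (the rewrite author's own statement) =====
-- stated objective: alternative
-- what changed: Single-pass defaultdict appending (plus two unused accumulators) replaced by a two-phase grouping: parse all names into (last, first) pairs, dedup the last names with dict.fromkeys, and build each group by a per-key filter of the pair list; the dead set/count accumulators are dropped.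
import Mathlib
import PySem

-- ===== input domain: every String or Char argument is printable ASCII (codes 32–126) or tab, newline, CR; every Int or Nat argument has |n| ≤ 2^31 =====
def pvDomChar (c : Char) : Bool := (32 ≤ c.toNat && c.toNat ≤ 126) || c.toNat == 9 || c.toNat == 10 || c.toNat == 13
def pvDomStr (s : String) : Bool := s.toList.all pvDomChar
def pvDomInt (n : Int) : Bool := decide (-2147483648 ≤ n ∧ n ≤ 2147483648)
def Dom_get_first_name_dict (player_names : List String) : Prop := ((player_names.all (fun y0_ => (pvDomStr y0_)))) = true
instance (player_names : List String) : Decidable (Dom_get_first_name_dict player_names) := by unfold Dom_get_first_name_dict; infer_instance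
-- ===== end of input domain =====

-- B re-implements A as two-phase grouping (alternative decomposition, same return value); A's dead set/count accumulators are dropped.

-- ===== PORT A =====
-- parts = name.split(' '); last = parts[-1]; first = parts[-2] if len(parts) > 1 else ''
-- split(' ') (separator nonempty) always yields 'some' of a nonempty list, so both .getD fallbacks are unreachable.
def pvParts (name : String) : List String := (PySem.Str.split? name " ").getD []

def pvLastOf (name : String) : String :=
  (PySem.List.pyGet? (pvParts name) (-1)).getD ""

def pvFirstOf (name : String) : String :=
  if 1 < (pvParts name).length then (PySem.List.pyGet? (pvParts name) (-2)).getD "" else ""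

-- the loop carries all three of A's accumulators: last_name_set, first_name_count, first_name_dict
def get_first_name_dict (player_names : List String) : List (String × List String) :=
  (player_names.foldl
    (fun (st : PySem.Set String × PySem.Dict String Int × PySem.Dict String (List String)) name =>
      (PySem.Set.add st.1 (pvLastOf name),
       st.2.1.modify (pvFirstOf name) 0 (· + 1),
       st.2.2.modify (pvLastOf name) [] (· ++ [pvFirstOf name])))
    (PySem.Set.empty, PySem.Dict.empty, PySem.Dict.empty)).2.2.items

-- ===== PORT B =====
def pvPairs (player_names : List String) : List (String × String) :=
  player_names.map (fun name => (pvLastOf name, pvFirstOf name))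

def get_first_name_dict_alt (player_names : List String) : List (String × List String) :=
  ((PySem.List.dedup ((pvPairs player_names).map (·.1))).foldl
    (fun (d : PySem.Dict String (List String)) last =>
      d.insert last (((pvPairs player_names).filter (fun p => p.1 == last)).map (·.2)))
    PySem.Dict.empty).items

-- ===== PRECONDITION & SPEC =====
def Spec_get_first_name_dict (player_names : List String) (out : List (String × List String)) : Prop := out = get_first_name_dict_alt player_names
instance (player_names : List String) (out : List (String × List String)) : Decidable (Spec_get_first_name_dict player_names out) := by unfold Spec_get_first_name_dict; infer_instance

-- ===== CLAIM (what is proved, stated in full; the proofs are below) =====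
def Claim_equal_get_first_name_dict : Prop := ∀ (player_names : List String), Dom_get_first_name_dict player_names → Spec_get_first_name_dict player_names (get_first_name_dict player_names)

-- ===== LEMMAS AND PROOFS =====


-- A's triple-state fold: the dict component ignores the other two accumulators
theorem pvThird_foldl (names : List String)
    (s : PySem.Set String) (c : PySem.Dict String Int) (d : PySem.Dict String (List String)) :
    (names.foldl
      (fun (st : PySem.Set String × PySem.Dict String Int × PySem.Dict String (List String)) name =>
        (PySem.Set.add st.1 (pvLastOf name),
         st.2.1.modify (pvFirstOf name) 0 (· + 1),
         st.2.2.modify (pvLastOf name) [] (· ++ [pvFirstOf name])))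
      (s, c, d)).2.2
    = names.foldl (fun d name => d.modify (pvLastOf name) [] (· ++ [pvFirstOf name])) d := by
  induction names generalizing s c d with
  | nil => rfl
  | cons n t ih => simpa using ih _ _ _

-- ===== VERDICT (by name: the statement is the Claim_ definition above) =====
theorem get_first_name_dict_spec : Claim_equal_get_first_name_dict := by
  intro names _
  unfold Spec_get_first_name_dict get_first_name_dict get_first_name_dict_alt
  rw [pvThird_foldl]
  have hd : (names.foldl (fun d name => d.modify (pvLastOf name) [] (· ++ [pvFirstOf name]))
      PySem.Dict.empty)
      = ((pvPairs names).foldl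
          (fun (d : PySem.Dict String (List String)) p => d.modify p.1 [] (· ++ [p.2]))
          PySem.Dict.empty) := by
    rw [pvPairs, List.foldl_map]
  rw [hd]
  set pairs := pvPairs names with hpairs
  set dA := pairs.foldl (fun (d : PySem.Dict String (List String)) p => d.modify p.1 [] (· ++ [p.2]))
      PySem.Dict.empty with hdA
  have hnodup : dA.keys.Nodup := by
    rw [hdA]
    exact PySem.Dict.nodup_keys_foldl_modify_key pairs Prod.fst []
      (fun d p => fun l => l ++ [p.2]) PySem.Dict.empty (by simp [PySem.Dict.keys_empty])
  have hkeys : dA.keys = PySem.List.dedup (pairs.map (·.1)) := by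
    rw [hdA, PySem.Dict.keys_foldl_modify_key, PySem.Dict.keys_empty,
      PySem.Set.update_nil_left, PySem.List.dedup_eq_ofList]
  -- left side: items of A's dict as a map over its (deduped) keys
  rw [PySem.Dict.items_eq_map_keys dA hnodup [], hkeys]
  -- right side: B's insert loop over fresh distinct keys appends its pairs
  rw [PySem.Dict.items_foldl_insert_fresh
      (PySem.List.dedup (pairs.map (·.1)))
      (fun last => last)
      (fun last => (pairs.filter (fun p => p.1 == last)).map (·.2))
      PySem.Dict.empty
      (by intro a _; simp [PySem.Dict.contains_empty])
      (by simp)]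
  simp only [PySem.Dict.empty, List.nil_append]
  refine List.map_congr_left ?_
  intro k hk
  rw [hdA, PySem.Dict.getD_foldl_modify_append, PySem.Dict.getD_empty, List.nil_append]
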